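-- pv_equiv track=rewrite | github.com/netodeolino/TCC | TCC 01/Extração/extratorpy.py | extrairRetornar
-- ===== SOURCE A (Python) =====
-- def extrairRetornar(string, inicio):
-- 	aux = ""
--
-- 	i = inicio;
-- 	while i < len(string):
-- 		if (string[i] != "."):
-- 			aux += string[i]
-- 		if ((string[i] == ".") and (string[i-1] == "V")):
-- 			aux += string[i]
-- 		if (string[i] == ".") and (string[i-1] != "V"):
-- 			break
-- 		i += 1
--
-- 	return aux
-- ===== SOURCE B (Python) =====
-- def extrairRetornar(string, inicio):
--     # Jump from dot to dot with str.find instead of copying character by character,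
--     # then return one slice. (For negative inicio A wraps around and rescans; B uses
--     # plain tail semantics there -- see the stated intended difference D_.)
--     i = inicio
--     while True:
--         d = string.find('.', i)
--         if d == -1:
--             return string[inicio:]
--         if string[d - 1] != 'V':
--             return string[inicio:d]
--         i = d + 1
-- ===== Notes on version B (the rewrite author's own statement) =====
-- stated objective: alternative
-- what changed: Instead of copying character by character in a Python-level while loop, B jumps from dot to dot with str.find and returns a single slice string[inicio:stop].
-- intended difference: On negative inicio (within Pre_) whose tail string[inicio:] has no terminating period, A wraps around and returns the tail plus a rescan of the string from index 0 (negative-index wraparound accident), while B returns just the tail slice, the intended 'extract from this start position' value. — e.g. on extrairRetornar("ab", -1): A returns "bab", B returns "b"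
import Mathlib
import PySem

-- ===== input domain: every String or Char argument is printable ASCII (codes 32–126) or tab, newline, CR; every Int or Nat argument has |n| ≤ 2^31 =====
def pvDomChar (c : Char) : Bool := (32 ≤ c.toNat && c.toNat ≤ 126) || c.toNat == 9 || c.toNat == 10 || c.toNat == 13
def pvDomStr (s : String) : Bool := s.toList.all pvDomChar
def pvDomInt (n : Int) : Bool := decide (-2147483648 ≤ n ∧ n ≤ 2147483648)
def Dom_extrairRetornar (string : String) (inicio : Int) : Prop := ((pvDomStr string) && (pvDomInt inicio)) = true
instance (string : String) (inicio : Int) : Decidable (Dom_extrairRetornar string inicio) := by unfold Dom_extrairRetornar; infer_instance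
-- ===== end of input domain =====

-- B jumps from dot to dot with str.find and returns a single slice instead of copying
-- character by character; on negative inicio B reads it as a plain tail offset where A
-- accidentally wraps around (stated in D_ below).

-- ===== PORT A =====
-- A's while loop: i counts up from inicio; aux accumulates the kept characters.
-- The `none` branches of the two pyGet? matches are Python's IndexError (excluded by Pre_).
def extrairRetornarLoopA (cs : List Char) (i : Int) (aux : List Char) : List Char :=
  if _h : i < (cs.length : Int) then
    match PySem.List.pyGet? cs i with
    | none => aux
    | some c =>
      if c ≠ '.' then extrairRetornarLoopA cs (i + 1) (aux ++ [c])
      else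
        match PySem.List.pyGet? cs (i - 1) with
        | none => aux
        | some p => if p = 'V' then extrairRetornarLoopA cs (i + 1) (aux ++ [c]) else aux
  else aux
termination_by ((cs.length : Int) - i).toNat
decreasing_by all_goals omega

def extrairRetornar (string : String) (inicio : Int) : String :=
  String.ofList (extrairRetornarLoopA string.toList inicio [])

-- ===== PORT B =====
-- string.find('.', i): Python clamps a negative start to max(0, len+i), then scans for '.'.
def extrairRetornarFindDot (cs : List Char) (k : Nat) : Option Nat :=
  if h : k < cs.length then
    if cs[k] = '.' then some k else extrairRetornarFindDot cs (k + 1)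
  else none
termination_by cs.length - k

theorem findDot_bounds (cs : List Char) (k d : Nat)
    (h : extrairRetornarFindDot cs k = some d) : k ≤ d ∧ d < cs.length := by
  fun_induction extrairRetornarFindDot cs k with
  | case1 k hk heq => simp at h; subst h; exact ⟨le_rfl, hk⟩
  | case2 k hk heq ih => have := ih h; omega
  | case3 k hk => simp_all

def extrairRetornarPyFindDot (cs : List Char) (i : Int) : Int :=
  let k : Nat := if 0 ≤ i then i.toNat else ((cs.length : Int) + i).toNat
  match extrairRetornarFindDot cs k with
  | none => -1
  | some d => (d : Int)

theorem pyFindDot_bounds (cs : List Char) (i : Int)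
    (h : extrairRetornarPyFindDot cs i ≠ -1) :
    0 ≤ extrairRetornarPyFindDot cs i ∧ i ≤ extrairRetornarPyFindDot cs i ∧ extrairRetornarPyFindDot cs i < (cs.length : Int) := by
  unfold extrairRetornarPyFindDot at *
  cases hfd : extrairRetornarFindDot cs (if 0 ≤ i then i.toNat else ((cs.length : Int) + i).toNat) with
  | none => simp [hfd] at h
  | some d =>
    have hb := findDot_bounds cs _ d hfd
    simp only [hfd]
    by_cases hp : (0:Int) ≤ i <;> simp [hp] at hb ⊢ <;> omega

def extrairRetornarLoopB (cs : List Char) (inicio i : Int) : List Char :=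
  let d := extrairRetornarPyFindDot cs i
  if d = -1 then PySem.List.slice cs (some inicio) none
  else
    match PySem.List.pyGet? cs (d - 1) with
    | none => []
    | some p =>
      if p ≠ 'V' then PySem.List.slice cs (some inicio) (some d)
      else extrairRetornarLoopB cs inicio (d + 1)
termination_by ((cs.length : Int) + 1 - i).toNat
decreasing_by
  have := pyFindDot_bounds cs i (by assumption)
  omega

def extrairRetornar_alt (string : String) (inicio : Int) : String :=
  String.ofList (extrairRetornarLoopB string.toList inicio inicio)

-- ===== PRECONDITION & SPEC =====
-- Pre_ excludes exactly the inputs where A raises IndexError: inicio < -len(string)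
-- (string[inicio] out of range; this covers every negative inicio on the empty string),
-- and inicio = -len(string) with string[0] = '.' (A then reads string[inicio-1]).
def Pre_extrairRetornar (string : String) (inicio : Int) : Prop :=
  -(string.toList.length : Int) ≤ inicio ∧
    (string.toList.head? = some '.' → inicio ≠ -(string.toList.length : Int))
instance (string : String) (inicio : Int) : Decidable (Pre_extrairRetornar string inicio) := by
  unfold Pre_extrairRetornar; infer_instance

def pvWitness_extrairRetornar : String × Int := ("aV.b.c", 1)

-- On negative inicio (inside Pre_) whose tail string[inicio:] contains no terminating
-- period, A returns that tail plus an accidental rescan of the string from index 0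
-- (negative-index wraparound of the while loop), while B returns just the tail slice up
-- to the terminating period, the intended "extract from this start position" value.
def D_extrairRetornar (string : String) (inicio : Int) : Prop :=
  let cs := string.toList
  inicio < 0 ∧ (∀ p < cs.length, cs[p]? = some '.' →
    (p : Int) < cs.length + inicio ∨ cs[p - 1]? = some 'V') ∧
    (cs.head? = some '.' → cs.getLast? = some 'V')
instance (string : String) (inicio : Int) : Decidable (D_extrairRetornar string inicio) := by
  unfold D_extrairRetornar; infer_instance

def Spec_extrairRetornar (string : String) (inicio : Int) (out : String) : Prop :=
  ¬ D_extrairRetornar string inicio → out = extrairRetornar_alt string inicio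
instance (string : String) (inicio : Int) (out : String) : Decidable (Spec_extrairRetornar string inicio out) := by
  unfold Spec_extrairRetornar; infer_instance

def pvDiffWitness_extrairRetornar : String × Int := ("ab", -1)
def pvDiffWitnessOut_extrairRetornar : String × String := ("bab", "b")

-- ===== CLAIM (what is proved, stated in full; the proofs are below) =====
def Claim_unchanged_extrairRetornar : Prop := ∀ (string : String) (inicio : Int), Dom_extrairRetornar string inicio → Pre_extrairRetornar string inicio → Spec_extrairRetornar string inicio (extrairRetornar string inicio)
def Claim_changed_extrairRetornar : Prop := Dom_extrairRetornar (pvDiffWitness_extrairRetornar.1) (pvDiffWitness_extrairRetornar.2) ∧ Pre_extrairRetornar (pvDiffWitness_extrairRetornar.1) (pvDiffWitness_extrairRetornar.2) ∧ D_extrairRetornar (pvDiffWitness_extrairRetornar.1) (pvDiffWitness_extrairRetornar.2) ∧ extrairRetornar (pvDiffWitness_extrairRetornar.1) (pvDiffWitness_extrairRetornar.2) = pvDiffWitnessOut_extrairRetornar.1 ∧ extrairRetornar_alt (pvDiffWitness_extrairRetornar.1) (pvDiffWitness_extrairRetornar.2) = pvDiffWitnessOut_extrairRetornar.2 ∧ pvDiffWitnessOut_extrairRetornar.1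 ≠ pvDiffWitnessOut_extrairRetornar.2
def Claim_exact_extrairRetornar : Prop := ∀ (string : String) (inicio : Int), Dom_extrairRetornar string inicio → Pre_extrairRetornar string inicio → D_extrairRetornar string inicio → extrairRetornar string inicio ≠ extrairRetornar_alt string inicio
-- ===== LEMMAS AND PROOFS =====

-- first position ≥ k where both scans stop: a '.' whose Python predecessor (index j-1,
-- with the j = 0 wraparound to the last character) is not 'V'
def pvFirstStop (cs : List Char) (k : Nat) : Option Nat :=
  if h : k < cs.length then
    if cs[k]? = some '.' ∧ PySem.List.pyGet? cs ((k : Int) - 1) ≠ some 'V' then some k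
    else pvFirstStop cs (k + 1)
  else none
termination_by cs.length - k

theorem pvFirstStop_bounds (cs : List Char) (k p : Nat) (h : pvFirstStop cs k = some p) :
    k ≤ p ∧ p < cs.length ∧ (cs[p]? = some '.' ∧ PySem.List.pyGet? cs ((p : Int) - 1) ≠ some 'V') := by
  fun_induction pvFirstStop cs k with
  | case1 k hk hs => simp at h; subst h; exact ⟨le_refl _, hk, hs⟩
  | case2 k hk hs ih =>
    obtain ⟨h1, h2, h3⟩ := ih h
    exact ⟨by omega, h2, h3⟩
  | case3 k hk => simp_all

theorem pvFirstStop_congr (cs : List Char) (k m : Nat) (hkm : k ≤ m)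
    (h : ∀ j, k ≤ j → j < m → ¬ (cs[j]? = some '.' ∧ PySem.List.pyGet? cs ((j : Int) - 1) ≠ some 'V')) : pvFirstStop cs k = pvFirstStop cs m := by
  fun_induction pvFirstStop cs k with
  | case1 k hk hs =>
    rcases Nat.eq_or_lt_of_le hkm with rfl | hlt
    · conv_rhs => rw [pvFirstStop]
      rw [dif_pos hk, if_pos hs]
    · exact absurd hs (h k le_rfl hlt)
  | case2 k hk hs ih =>
    rcases Nat.eq_or_lt_of_le hkm with rfl | hlt
    · conv_rhs => rw [pvFirstStop]
      rw [dif_pos hk, if_neg hs]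
    · exact ih hlt (fun j h1 h2 => h j (by omega) h2)
  | case3 k hk =>
    have hm : ¬ m < cs.length := by omega
    conv_rhs => rw [pvFirstStop]
    simp [hm]

theorem pvFirstStop_none (cs : List Char) (k : Nat)
    (h : ∀ j, k ≤ j → j < cs.length → ¬ (cs[j]? = some '.' ∧ PySem.List.pyGet? cs ((j : Int) - 1) ≠ some 'V')) : pvFirstStop cs k = none := by
  fun_induction pvFirstStop cs k with
  | case1 k hk hs => exact absurd hs (h k le_rfl hk)
  | case2 k hk hs ih => exact ih (fun j h1 h2 => h j (by omega) h2)
  | case3 k hk => rfl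

def pvSeg (cs : List Char) (k : Nat) : List Char :=
  match pvFirstStop cs k with
  | some p => (cs.drop k).take (p - k)
  | none => cs.drop k

theorem pvSeg_ge (cs : List Char) (k : Nat) (h : cs.length ≤ k) : pvSeg cs k = [] := by
  unfold pvSeg
  rw [pvFirstStop]
  simp [Nat.not_lt.mpr h, List.drop_eq_nil_of_le h]

theorem pvSeg_stop (cs : List Char) (k : Nat) (hk : k < cs.length) (hs : (cs[k]? = some '.' ∧ PySem.List.pyGet? cs ((k : Int) - 1) ≠ some 'V')) :
    pvSeg cs k = [] := by
  unfold pvSeg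
  rw [pvFirstStop, dif_pos hk, if_pos hs]
  show List.take (k - k) (List.drop k cs) = []
  rw [Nat.sub_self, List.take_zero]

theorem pvSeg_step (cs : List Char) (k : Nat) (hk : k < cs.length) (hs : ¬ (cs[k]? = some '.' ∧ PySem.List.pyGet? cs ((k : Int) - 1) ≠ some 'V')) :
    pvSeg cs k = cs[k] :: pvSeg cs (k + 1) := by
  unfold pvSeg
  rw [pvFirstStop, dif_pos hk, if_neg hs]
  have hdrop : cs.drop k = cs[k] :: cs.drop (k + 1) := List.drop_eq_getElem_cons hk
  cases hfs : pvFirstStop cs (k + 1) with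
  | none => exact hdrop
  | some p =>
    have hb := pvFirstStop_bounds cs (k + 1) p hfs
    have hpk : p - k = (p - (k + 1)) + 1 := by omega
    simp only [hdrop, hpk, List.take_succ_cons]

theorem pvFirstStop_none_all (cs : List Char) (k : Nat) (h : pvFirstStop cs k = none) :
    ∀ j, k ≤ j → j < cs.length → ¬ (cs[j]? = some '.' ∧ PySem.List.pyGet? cs ((j : Int) - 1) ≠ some 'V') := by
  fun_induction pvFirstStop cs k with
  | case1 k hk hs => simp_all
  | case2 k hk hs ih =>
    intro j hj1 hj2
    rcases Nat.eq_or_lt_of_le hj1 with rfl | hlt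
    · exact hs
    · exact ih h j hlt hj2
  | case3 k hk => intro j hj1 hj2; omega

theorem pyGet?_prev_some (cs : List Char) (k : Nat) (hk : k < cs.length) :
    ∃ q, PySem.List.pyGet? cs ((k : Int) - 1) = some q ∧
      (1 ≤ k → cs[k-1]? = some q) ∧ (k = 0 → cs.getLast? = some q) := by
  rcases Nat.eq_zero_or_pos k with rfl | hpos
  · have hne : cs ≠ [] := by intro h; simp [h] at hk
    obtain ⟨q, hq⟩ := Option.ne_none_iff_exists'.mp (by simp [List.getLast?_eq_none_iff, hne] :
      cs.getLast? ≠ none)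
    refine ⟨q, ?_, by omega, fun _ => hq⟩
    have : ((0:Nat) : Int) - 1 = -1 := by norm_num
    rw [this, PySem.List.pyGet?_neg_one, hq]
  · have hcast : ((k : Int) - 1) = ((k - 1 : Nat) : Int) := by omega
    refine ⟨cs[k-1], ?_, fun _ => by simp [List.getElem?_eq_getElem (by omega : k - 1 < cs.length)], by omega⟩
    rw [hcast, PySem.List.pyGet?_natCast, List.getElem?_eq_getElem (by omega : k - 1 < cs.length)]

theorem loopA_nonneg_aux (cs : List Char) (n : Nat) : ∀ k aux, cs.length - k ≤ n →
    extrairRetornarLoopA cs (k : Int) aux = aux ++ pvSeg cs k := by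
  induction n with
  | zero =>
    intro k aux h
    rw [extrairRetornarLoopA, dif_neg (by push_cast; omega), pvSeg_ge cs k (by omega), List.append_nil]
  | succ n ih =>
    intro k aux h
    by_cases hk : k < cs.length
    · rw [extrairRetornarLoopA, dif_pos (by push_cast; omega)]
      simp only [PySem.List.pyGet?_natCast, List.getElem?_eq_getElem hk]
      by_cases hc : cs[k] = '.'
      · obtain ⟨q, hq, hq1, hq0⟩ := pyGet?_prev_some cs k hk
        have hrec := ih (k+1) (aux ++ [cs[k]]) (by omega)
        push_cast at hrec
        rw [hc] at hrec
        by_cases hv : q = 'V'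
        · have hns : ¬ (cs[k]? = some '.' ∧ PySem.List.pyGet? cs ((k : Int) - 1) ≠ some 'V') := by
            simp [hq, hv]
          rw [pvSeg_step cs k hk hns]
          simp [hc, hq, hv, hrec]
        · have hst : (cs[k]? = some '.' ∧ PySem.List.pyGet? cs ((k : Int) - 1) ≠ some 'V') := ⟨by simp [List.getElem?_eq_getElem hk, hc], by simp [hq, hv]⟩
          rw [pvSeg_stop cs k hk hst, List.append_nil]
          simp [hc, hq, hv]
      · have hns : ¬ (cs[k]? = some '.' ∧ PySem.List.pyGet? cs ((k : Int) - 1) ≠ some 'V') := by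
          simp [List.getElem?_eq_getElem hk, hc]
        have hrec := ih (k+1) (aux ++ [cs[k]]) (by omega)
        push_cast at hrec
        rw [pvSeg_step cs k hk hns]
        simp [hc, hrec]
    · rw [extrairRetornarLoopA, dif_neg (by push_cast; omega), pvSeg_ge cs k (by omega), List.append_nil]

theorem pyGet?_of_neg (cs : List Char) (i : Int) (h1 : -(cs.length:Int) ≤ i) (h2 : i < 0) :
    PySem.List.pyGet? cs i = cs[((cs.length:Int)+i).toNat]? := by
  have hk : i = -(((-i).toNat : Nat) : Int) := by omega
  rw [hk, PySem.List.pyGet?_neg_natCast _ _ (by omega) (by omega)]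
  congr 1
  omega

theorem loopA_neg_aux (cs : List Char) (n : Nat) : ∀ i aux, -(cs.length:Int) ≤ i → i < 0 →
    (i = -(cs.length:Int) → cs.head? ≠ some '.') → (-i).toNat ≤ n →
    extrairRetornarLoopA cs i aux =
      match pvFirstStop cs ((cs.length:Int)+i).toNat with
      | some _ => aux ++ pvSeg cs ((cs.length:Int)+i).toNat
      | none => extrairRetornarLoopA cs 0 (aux ++ pvSeg cs ((cs.length:Int)+i).toNat) := by
  induction n with
  | zero => intro i aux h1 h2 hg hn; omega
  | succ n ih =>
    intro i aux h1 h2 hg hn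
    set s : Nat := ((cs.length:Int)+i).toNat with hs
    have hslt : s < cs.length := by omega
    have hget : PySem.List.pyGet? cs i = some cs[s] := by
      rw [pyGet?_of_neg cs i h1 h2, List.getElem?_eq_getElem hslt]
    have hsucc : ((cs.length:Int)+(i+1)).toNat = s + 1 := by omega
    rw [extrairRetornarLoopA, dif_pos (by omega), hget]
    simp only [ne_eq]
    by_cases hc : cs[s] = '.'
    · -- a period: look at the previous character
      rcases eq_or_lt_of_le h1 with heq | hlt
      · exfalso
        have hs0 : s = 0 := by omega
        have : cs.head? = some '.' := by
          rw [List.head?_eq_getElem?, ← hs0, List.getElem?_eq_getElem hslt, hc]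
        exact hg heq.symm this
      · have hprev : PySem.List.pyGet? cs (i-1) = some cs[s-1] := by
          rw [pyGet?_of_neg cs (i-1) (by omega) (by omega)]
          rw [List.getElem?_eq_getElem (by omega : ((cs.length:Int)+(i-1)).toNat < cs.length)]
          congr 2
          omega
        have hs1 : 1 ≤ s := by omega
        have hstop_iff : PySem.List.pyGet? cs ((s:Int)-1) = some cs[s-1] := by
          have : ((s:Int)-1) = ((s-1 : Nat) : Int) := by omega
          rw [this, PySem.List.pyGet?_natCast, List.getElem?_eq_getElem (by omega)]
        rw [if_neg (by simp [hc])]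
        simp only [hprev]
        by_cases hv : cs[s-1] = 'V'
        · -- 'V.': keep the dot and continue
          have hns : ¬ (cs[s]? = some '.' ∧ PySem.List.pyGet? cs ((s : Int) - 1) ≠ some 'V') := by simp [hstop_iff, hv]
          have hfs := pvFirstStop_congr cs s (s+1) (by omega)
            (fun j hj1 hj2 => by
              have hj : j = s := by omega
              exact fun hstop => hns (hj ▸ hstop))
          have hseg := pvSeg_step cs s hslt hns
          rw [hfs, hseg, if_pos hv]
          rcases eq_or_lt_of_le (by omega : i + 1 ≤ 0) with hi0 | hineg
          · -- the scan wrapped: next index is 0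
            have hfs1 : pvFirstStop cs (s+1) = none := by
              rw [pvFirstStop, dif_neg (by omega : ¬ (s+1) < cs.length)]
            have hseg1 : pvSeg cs (s+1) = [] := pvSeg_ge cs (s+1) (by omega)
            rw [hi0, hfs1, hseg1]
          · have hrec := ih (i+1) (aux ++ [cs[s]]) (by omega) (by omega) (by omega) (by omega)
            rw [hsucc] at hrec
            rw [hrec]
            cases pvFirstStop cs (s+1) <;> simp
        · -- terminating period: break
          have hst : (cs[s]? = some '.' ∧ PySem.List.pyGet? cs ((s : Int) - 1) ≠ some 'V') := ⟨by simp [List.getElem?_eq_getElem hslt, hc], by simp [hstop_iff, hv]⟩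
          have hfs : pvFirstStop cs s = some s := by rw [pvFirstStop, dif_pos hslt, if_pos hst]
          rw [if_neg hv, hfs, pvSeg_stop cs s hslt hst, List.append_nil]
    · -- ordinary character: append and continue
      have hns : ¬ (cs[s]? = some '.' ∧ PySem.List.pyGet? cs ((s : Int) - 1) ≠ some 'V') := by simp [List.getElem?_eq_getElem hslt, hc]
      have hfs := pvFirstStop_congr cs s (s+1) (by omega)
        (fun j hj1 hj2 => by
          have hj : j = s := by omega
          exact fun hstop => hns (hj ▸ hstop))
      have hseg := pvSeg_step cs s hslt hns
      rw [if_pos hc, hfs, hseg]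
      rcases eq_or_lt_of_le (by omega : i + 1 ≤ 0) with hi0 | hineg
      · have hfs1 : pvFirstStop cs (s+1) = none := by
          rw [pvFirstStop, dif_neg (by omega : ¬ (s+1) < cs.length)]
        have hseg1 : pvSeg cs (s+1) = [] := pvSeg_ge cs (s+1) (by omega)
        rw [hi0, hfs1, hseg1]
      · have hrec := ih (i+1) (aux ++ [cs[s]]) (by omega) (by omega) (by omega) (by omega)
        rw [hsucc] at hrec
        rw [hrec]
        cases pvFirstStop cs (s+1) <;> simp

theorem findDot_spec (cs : List Char) (k d : Nat)
    (h : extrairRetornarFindDot cs k = some d) :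
    cs[d]? = some '.' ∧ ∀ j, k ≤ j → j < d → cs[j]? ≠ some '.' := by
  fun_induction extrairRetornarFindDot cs k with
  | case1 k hk heq =>
    simp at h; subst h
    exact ⟨by simp [List.getElem?_eq_getElem hk, heq], fun j h1 h2 => by omega⟩
  | case2 k hk heq ih =>
    obtain ⟨h1, h2⟩ := ih h
    refine ⟨h1, fun j hj1 hj2 => ?_⟩
    rcases Nat.eq_or_lt_of_le hj1 with rfl | hlt
    · simp [List.getElem?_eq_getElem hk, heq]
    · exact h2 j hlt hj2
  | case3 k hk => simp_all

theorem findDot_none (cs : List Char) (k : Nat) (h : extrairRetornarFindDot cs k = none) :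
    ∀ j, k ≤ j → j < cs.length → cs[j]? ≠ some '.' := by
  fun_induction extrairRetornarFindDot cs k with
  | case1 k hk heq => simp_all
  | case2 k hk heq ih =>
    intro j hj1 hj2
    rcases Nat.eq_or_lt_of_le hj1 with rfl | hlt
    · simp [List.getElem?_eq_getElem hk, heq]
    · exact ih h j hlt hj2
  | case3 k hk => intro j hj1 hj2; omega

theorem loopB_none (cs : List Char) (inicio i : Int) (K : Nat)
    (hK : (K : Int) = (if 0 ≤ i then i else (cs.length:Int) + i)) (h1 : -(cs.length:Int) ≤ i)
    (hfd : extrairRetornarFindDot cs K = none) :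
    extrairRetornarLoopB cs inicio i =
      match pvFirstStop cs K with
      | some p => PySem.List.slice cs (some inicio) (some (p:Int))
      | none => PySem.List.slice cs (some inicio) none := by
  have hkK : (if 0 ≤ i then i.toNat else ((cs.length : Int) + i).toNat) = K := by
    by_cases hp : (0:Int) ≤ i <;> simp [hp] at hK ⊢ <;> omega
  have hpf : extrairRetornarPyFindDot cs i = -1 := by
    unfold extrairRetornarPyFindDot
    rw [hkK]
    simp [hfd]
  have hfs : pvFirstStop cs K = none :=
    pvFirstStop_none cs K (fun j hj1 hj2 hstop => findDot_none cs K hfd j hj1 hj2 hstop.1)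
  rw [extrairRetornarLoopB]
  simp [hpf, hfs]

theorem loopB_zero (cs : List Char) (inicio i : Int) (K : Nat)
    (hK : (K : Int) = (if 0 ≤ i then i else (cs.length:Int) + i)) (h1 : -(cs.length:Int) ≤ i)
    (hKlen : cs.length ≤ K) :
    extrairRetornarLoopB cs inicio i =
      match pvFirstStop cs K with
      | some p => PySem.List.slice cs (some inicio) (some (p:Int))
      | none => PySem.List.slice cs (some inicio) none :=
  loopB_none cs inicio i K hK h1 (by rw [extrairRetornarFindDot, dif_neg (by omega)])

theorem loopB_spec_aux (cs : List Char) (inicio : Int) (n : Nat) : ∀ (i : Int) (K : Nat),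
    (K : Int) = (if 0 ≤ i then i else (cs.length:Int) + i) → -(cs.length:Int) ≤ i →
    cs.length - K ≤ n →
    extrairRetornarLoopB cs inicio i =
      match pvFirstStop cs K with
      | some p => PySem.List.slice cs (some inicio) (some (p:Int))
      | none => PySem.List.slice cs (some inicio) none := by
  have main : ∀ n, (∀ (i : Int) (K : Nat),
      (K : Int) = (if 0 ≤ i then i else (cs.length:Int) + i) → -(cs.length:Int) ≤ i →
      cs.length - K ≤ n →
      extrairRetornarLoopB cs inicio i =
        match pvFirstStop cs K with
        | some p => PySem.List.slice cs (some inicio) (some (p:Int))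
        | none => PySem.List.slice cs (some inicio) none) := by
    intro n
    induction n with
    | zero => exact fun i K hK h1 hn => loopB_zero cs inicio i K hK h1 (by omega)
    | succ n ih =>
      intro i K hK h1 hn
      have hkK : (if 0 ≤ i then i.toNat else ((cs.length : Int) + i).toNat) = K := by
        by_cases hp : (0:Int) ≤ i <;> simp [hp] at hK ⊢ <;> omega
      have hpf : extrairRetornarPyFindDot cs i =
          (match extrairRetornarFindDot cs K with | none => -1 | some d => (d:Int)) := by
        unfold extrairRetornarPyFindDot
        rw [hkK]
      cases hfd : extrairRetornarFindDot cs K with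
      | none => exact loopB_none cs inicio i K hK h1 hfd
      | some d0 =>
        obtain ⟨hdot, hnodot⟩ := findDot_spec cs K d0 hfd
        have hb := findDot_bounds cs K d0 hfd
        have hne : ((d0:Int)) ≠ -1 := by omega
        obtain ⟨q, hq, hq1, hq0⟩ := pyGet?_prev_some cs d0 hb.2
        have nostop_lt : ∀ j, K ≤ j → j < d0 → ¬ (cs[j]? = some '.' ∧ PySem.List.pyGet? cs ((j : Int) - 1) ≠ some 'V') :=
          fun j hj1 hj2 hstop => hnodot j hj1 hj2 hstop.1
        by_cases hv : q = 'V'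
        · -- skip a 'V.' and jump to d0+1
          have hnsd : ¬ (cs[d0]? = some '.' ∧ PySem.List.pyGet? cs ((d0 : Int) - 1) ≠ some 'V') := by simp [hq, hv]
          have hfs : pvFirstStop cs K = pvFirstStop cs (d0+1) :=
            pvFirstStop_congr cs K (d0+1) (by omega) (fun j hj1 hj2 => by
              rcases Nat.lt_or_ge j d0 with hlt | hge
              · exact nostop_lt j hj1 hlt
              · have hj : j = d0 := by omega
                rw [hj]; exact hnsd)
          have hrec := ih ((d0:Int)+1) (d0+1)
            (by rw [if_pos (by omega : (0:Int) ≤ (d0:Int)+1)]; push_cast; ring)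
            (by omega) (by omega)
          rw [extrairRetornarLoopB]
          simp only [hpf, hfd, if_neg hne, hq, if_neg (by simp [hv] : ¬ q ≠ 'V')]
          rw [hrec, hfs]
        · -- terminating period
          have hst : (cs[d0]? = some '.' ∧ PySem.List.pyGet? cs ((d0 : Int) - 1) ≠ some 'V') := ⟨hdot, by rw [hq]; simp [hv]⟩
          have hfs : pvFirstStop cs K = some d0 := by
            rw [pvFirstStop_congr cs K d0 (by omega) nostop_lt, pvFirstStop,
              dif_pos hb.2, if_pos hst]
          rw [extrairRetornarLoopB]
          simp only [hpf, hfd, if_neg hne, hq, if_pos (by simp [hv] : q ≠ 'V'), hfs]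
  exact main n

theorem clampIdx_of_neg (n : Nat) (a : Int) (h1 : -(n:Int) ≤ a) (h2 : a < 0) :
    PySem.List.clampIdx n a = ((n:Int)+a).toNat := by
  have hk : a = -(((-a).toNat : Nat) : Int) := by omega
  rw [hk, PySem.List.clampIdx_neg_natCast _ _ (by omega)]
  omega

theorem slice_neg_some (cs : List Char) (a : Int) (b : Nat) (h1 : -(cs.length:Int) ≤ a) (h2 : a < 0) :
    PySem.List.slice cs (some a) (some (b:Int)) = (cs.drop ((cs.length:Int)+a).toNat).take (b - ((cs.length:Int)+a).toNat) := by
  simp [PySem.List.slice, clampIdx_of_neg _ _ h1 h2]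
  omega

theorem slice_neg_none (cs : List Char) (a : Int) (h1 : -(cs.length:Int) ≤ a) (h2 : a < 0) :
    PySem.List.slice cs (some a) none = cs.drop ((cs.length:Int)+a).toNat := by
  rw [PySem.List.slice_some_none, clampIdx_of_neg _ _ h1 h2]

-- A = B on Pre_ outside D_, at the level of character lists
theorem pv_main_eq (string : String) (inicio : Int)
    (hpre : Pre_extrairRetornar string inicio) (hnd : ¬ D_extrairRetornar string inicio) :
    extrairRetornarLoopA string.toList inicio [] = extrairRetornarLoopB string.toList inicio inicio := by
  obtain ⟨h1, h2⟩ := hpre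
  set cs := string.toList with hcs
  by_cases hp : (0:Int) ≤ inicio
  · -- non-negative start: both sides reduce to the first stop from inicio
    have hi : inicio = ((inicio.toNat : Nat) : Int) := by omega
    rw [hi, loopA_nonneg_aux cs cs.length inicio.toNat [] (by omega),
      loopB_spec_aux cs ((inicio.toNat : Nat) : Int) cs.length ((inicio.toNat : Nat) : Int) inicio.toNat
        (by rw [if_pos (by omega)]) (by omega) (by omega)]
    unfold pvSeg
    cases hfs : pvFirstStop cs inicio.toNat with
    | none => simp only [List.nil_append]; rw [PySem.List.slice_from_natCast]
    | some p => simp only [List.nil_append]; rw [PySem.List.slice_natCast]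
  · -- negative start inside Pre_
    have hneg : inicio < 0 := by omega
    have hg : inicio = -(cs.length:Int) → cs.head? ≠ some '.' := by
      intro he hh
      exact h2 hh he
    rw [loopA_neg_aux cs ((-inicio).toNat) inicio [] h1 hneg hg (by omega),
      loopB_spec_aux cs inicio cs.length inicio (((cs.length:Int)+inicio).toNat)
        (by rw [if_neg hp]; omega) h1 (by omega)]
    cases hfs : pvFirstStop cs ((cs.length:Int)+inicio).toNat with
    | some p =>
      unfold pvSeg
      simp only [hfs, slice_neg_some cs inicio p h1 hneg, List.nil_append]
    | none =>
      -- ¬ D_ forces string[0] = '.' with last character not 'V': A stops right after wrapping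
      have hlen : 0 < cs.length := by omega
      have hne : cs ≠ [] := by intro h; rw [h] at hlen; simp at hlen
      have hc3 : ∀ p, p < cs.length → cs[p]? = some '.' →
          (p : Int) < cs.length + inicio ∨ cs[p - 1]? = some 'V' := by
        intro p hplen hdot
        by_cases hwin : (p : Int) < cs.length + inicio
        · exact Or.inl hwin
        · have hns := pvFirstStop_none_all cs _ hfs p (by omega) hplen
          have hp1 : 1 ≤ p := by
            by_contra hp0
            have hp0' : p = 0 := by omega
            have : inicio = -(cs.length:Int) := by omega
            apply hg this
            rw [List.head?_eq_getElem?, ← hp0', hdot]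
          have hprev : PySem.List.pyGet? cs ((p:Int)-1) = cs[p-1]? := by
            have hc : ((p:Int)-1) = ((p-1 : Nat) : Int) := by omega
            rw [hc, PySem.List.pyGet?_natCast]
          rcases hv : cs[p-1]? with _ | q
          · exfalso
            rw [List.getElem?_eq_none_iff] at hv
            omega
          · refine Or.inr ?_
            by_contra hqv
            exact hns ⟨hdot, by rw [hprev, hv]; exact hqv⟩
      have hc4 : cs.head? = some '.' ∧ cs.getLast? ≠ some 'V' := by
        by_contra hc4'
        exact hnd ⟨hneg, hc3, fun hh => by
          by_contra hV
          exact hc4' ⟨hh, hV⟩⟩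
      -- evaluate A's wrapped continuation: it breaks immediately at index 0
      unfold pvSeg
      rw [hfs, extrairRetornarLoopA, dif_pos (by push_cast; omega)]
      have hget0 : PySem.List.pyGet? cs 0 = some '.' := by
        rw [PySem.List.pyGet?_zero, ← List.head?_eq_getElem?, hc4.1]
      have hgetm1 : PySem.List.pyGet? cs ((0:Int) - 1) = cs.getLast? := by
        norm_num [PySem.List.pyGet?_neg_one]
      rcases hlast : cs.getLast? with _ | q
      · exfalso
        rw [List.getLast?_eq_none_iff] at hlast
        exact hne hlast
      · have hqv : q ≠ 'V' := by
          intro hq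
          exact hc4.2 (by rw [hlast, hq])
        rw [hget0]
        simp only [hgetm1, hlast, ne_eq, if_neg (by decide : ¬¬('.' = '.')), if_neg hqv]
        rw [slice_neg_none cs inicio h1 hneg]
        simp

theorem pv_tight (string : String) (inicio : Int)
    (hpre : Pre_extrairRetornar string inicio) (hd : D_extrairRetornar string inicio) :
    extrairRetornarLoopA string.toList inicio [] ≠ extrairRetornarLoopB string.toList inicio inicio := by
  obtain ⟨h1, h2⟩ := hpre
  obtain ⟨hneg, hc3, hc4⟩ := hd
  set cs := string.toList with hcs
  have hlen : 0 < cs.length := by omega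
  have hne : cs ≠ [] := by intro h; rw [h] at hlen; simp at hlen
  have hg : inicio = -(cs.length:Int) → cs.head? ≠ some '.' := fun he hh => h2 hh he
  -- D_'s second conjunct says there is no stop in the scanned tail
  have hfs : pvFirstStop cs ((cs.length:Int)+inicio).toNat = none := by
    apply pvFirstStop_none
    rintro j hj1 hj2 ⟨hdot, hprevne⟩
    rcases hc3 j hj2 hdot with hwin | hVp
    · omega
    · rcases Nat.eq_zero_or_pos j with rfl | hj0
      · rw [hVp] at hdot
        exact absurd hdot (by decide)
      · apply hprevne
        have hc : ((j:Int)-1) = ((j-1 : Nat) : Int) := by omega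
        rw [hc, PySem.List.pyGet?_natCast, hVp]
  rw [loopA_neg_aux cs ((-inicio).toNat) inicio [] h1 hneg hg le_rfl,
    loopB_spec_aux cs inicio cs.length inicio (((cs.length:Int)+inicio).toNat)
      (by rw [if_neg (by omega)]; omega) h1 (by omega)]
  simp only [hfs]
  unfold pvSeg
  have hA := loopA_nonneg_aux cs cs.length 0 (cs.drop ((cs.length:Int)+inicio).toNat) (by omega)
  norm_num at hA
  simp only [hfs, List.nil_append, hA, slice_neg_none cs inicio h1 hneg]
  -- A appended a nonempty rescan after the tail, B returns just the tail
  have hseg_ne : pvSeg cs 0 ≠ [] := by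
    unfold pvSeg
    cases hf0 : pvFirstStop cs 0 with
    | none => simpa using hne
    | some p =>
      obtain ⟨_, hplen, hdot, hprev⟩ := pvFirstStop_bounds cs 0 p hf0
      have hp1 : 1 ≤ p := by
        by_contra hp0
        have hp0' : p = 0 := by omega
        have hlastV := hc4 (by rw [List.head?_eq_getElem?, ← hp0', hdot])
        apply hprev
        rw [hp0']
        have hm1 : (((0:Nat):Int) - 1) = (-1 : Int) := by norm_num
        rw [hm1, PySem.List.pyGet?_neg_one, hlastV]
      simp [List.take_eq_nil_iff, Nat.sub_eq_zero_iff_le]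
      exact ⟨by omega, hne⟩
  intro heq
  apply hseg_ne
  have hlength := congrArg List.length heq
  simp only [List.length_append] at hlength
  rw [← List.length_eq_zero_iff]
  omega

theorem ofList_inj (l1 l2 : List Char) (h : String.ofList l1 = String.ofList l2) : l1 = l2 := by
  simpa using congrArg String.toList h

-- ===== VERDICT (by name: the statement is the Claim_ definition above) =====
theorem extrairRetornar_spec : Claim_unchanged_extrairRetornar := by
  intro string inicio _ hpre hnd
  exact congrArg String.ofList (pv_main_eq string inicio hpre hnd)

theorem extrairRetornar_changed : Claim_changed_extrairRetornar := by
  unfold Claim_changed_extrairRetornar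
  refine ⟨by decide, by decide, by decide, ?_, ?_, by decide⟩
  · show extrairRetornar "ab" (-1) = "bab"
    unfold extrairRetornar
    rw [(by decide : "ab".toList = ['a','b']),
      (by simp [extrairRetornarLoopA, PySem.List.pyGet?, PySem.List.pyIdx?] :
        extrairRetornarLoopA ['a','b'] (-1) [] = ['b','a','b'])]
  · show extrairRetornar_alt "ab" (-1) = "b"
    unfold extrairRetornar_alt
    rw [(by decide : "ab".toList = ['a','b']),
      (by simp [extrairRetornarLoopB, extrairRetornarPyFindDot, extrairRetornarFindDot,
        PySem.List.pyGet?, PySem.List.pyIdx?, PySem.List.slice, PySem.List.clampIdx] :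
        extrairRetornarLoopB ['a','b'] (-1) (-1) = ['b'])]

theorem extrairRetornar_tight : Claim_exact_extrairRetornar := by
  intro string inicio _ hpre hd heq
  exact pv_tight string inicio hpre hd (ofList_inj _ _ heq)
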